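-- pv_equiv track=rewrite | github.com/Sachchava/QuestionsSolved | DP pepcoding/climbing stairs with variable steps.py | varpaths
-- ===== SOURCE A (Python) =====
-- def varpaths(n,dp,arr):
--     dp[n]=1
--     for i in range(n-1,-1,-1):
--         j = 1
--         while j<=arr[i] and i+j<len(dp):
--             dp[i] += dp[i+j]
--             j+=1
--     return dp[0]
-- ===== SOURCE B (Python) =====
-- # Suffix-sum re-implementation: O(m) total instead of O(n*maxstep).
-- # Return-value equivalent to A; A mutates dp in place, B does not.
-- def varpaths(n, dp, arr):
--     m = len(dp)
--     S = [0]                    # S[m-k] = sum of FINAL dp[k:] ; grown back-to-front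
--     for k in range(m - 1, n, -1):
--         S.append(S[-1] + dp[k])
--     S.append(S[-1] + 1)        # cell n is 1
--     for i in range(n - 1, -1, -1):
--         hi = max(i, min(i + arr[i], m - 1))
--         cell = dp[i] + S[-1] - S[m - 1 - hi]
--         S.append(S[-1] + cell)
--     return S[-1] - S[-2]
-- ===== Notes on version B (the rewrite author's own statement) =====
-- stated objective: faster
-- what changed: Replaces the inner while-loop (re-summing up to arr[i] cells per stair) by a back-to-front list of suffix sums of the final cell values, so each cell's contiguous range sum is obtained in O(1) by subtracting two suffix sums.
-- outside the precondition, e.g. on varpaths(-1, [5, 3], []): A returns 5, B returns 1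
import Mathlib
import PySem

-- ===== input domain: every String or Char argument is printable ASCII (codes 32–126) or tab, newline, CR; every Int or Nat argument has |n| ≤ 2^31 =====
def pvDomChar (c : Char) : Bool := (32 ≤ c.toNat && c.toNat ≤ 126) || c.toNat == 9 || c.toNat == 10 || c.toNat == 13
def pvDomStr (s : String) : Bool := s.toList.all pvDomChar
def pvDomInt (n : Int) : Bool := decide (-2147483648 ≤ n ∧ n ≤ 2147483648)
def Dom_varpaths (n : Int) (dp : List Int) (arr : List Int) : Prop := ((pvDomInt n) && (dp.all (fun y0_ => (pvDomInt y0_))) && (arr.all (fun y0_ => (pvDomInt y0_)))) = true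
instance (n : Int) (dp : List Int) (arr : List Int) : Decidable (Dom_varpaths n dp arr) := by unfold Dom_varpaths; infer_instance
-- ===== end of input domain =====

-- B replaces A's inner while-loop by suffix sums of the final cell values (each cell is one
-- O(1) difference of two suffix sums).  Equivalence is about the RETURN value only: A mutates
-- dp in place, B does not.

-- ===== PORT A =====
-- the inner 'while j<=arr[i] and i+j<len(dp)' loop; fuel only bounds the recursion (the loop
-- itself stops before j reaches len(dp)-i, so fuel = len(dp)+1 is never the reason to stop)
def varpathsWhile (arrI : Int) (i : Nat) : Nat → Nat → List Int → List Int
  | _, 0, dp => dp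
  | j, fuel+1, dp =>
      if (j : Int) ≤ arrI ∧ i + j < dp.length then
        varpathsWhile arrI i (j+1) fuel (dp.set i (dp.getD i 0 + dp.getD (i+j) 0))
      else dp

-- 'for i in range(n-1,-1,-1)': processes i = cnt-1, cnt-2, …, 0 (reads arr[i] and dp cells,
-- all in range under Pre_)
def varpathsOuter (arr : List Int) : Nat → List Int → List Int
  | 0, dp => dp
  | i+1, dp => varpathsOuter arr i (varpathsWhile (arr.getD i 0) i 1 (dp.length+1) dp)

def varpaths (n : Int) (dp : List Int) (arr : List Int) : Int :=
  match PySem.List.pySet? dp n 1 with          -- dp[n] = 1  (none = IndexError, outside Pre_)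
  | none => 0
  | some dp1 => PySem.List.pyGetD (varpathsOuter arr n.toNat dp1) 0 0   -- return dp[0]

-- ===== PORT B =====
-- first loop of Source B: S.append(S[-1] + dp[k]) for k = m-1 … n+1; the Lean list is Source B's S
-- reversed (head = S[-1]); counter value t+1 handles k = n+t+1
def altBuild (dp : List Int) (n : Nat) : Nat → List Int → List Int
  | 0, S => S
  | t+1, S => altBuild dp n t ((S.headD 0 + dp.getD (n+t+1) 0) :: S)

-- second loop of Source B: i = n-1 … 0; Source B's S[m-1-hi] is the element hi-i positions from the
-- end of S, i.e. at position hi-i from the head of the reversed list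
def altLoop (dp arr : List Int) (m : Nat) : Nat → List Int → List Int
  | 0, S => S
  | i+1, S =>
      let hi : Int := max (i : Int) (min ((i : Int) + arr.getD i 0) ((m : Int) - 1))
      let cell : Int := dp.getD i 0 + S.headD 0 - S.getD (hi - (i : Int)).toNat 0
      altLoop dp arr m i ((S.headD 0 + cell) :: S)

def varpaths_alt (n : Int) (dp : List Int) (arr : List Int) : Int :=
  let m := dp.length
  let nn := n.toNat
  let S1 := altBuild dp nn (m - 1 - nn) [0]
  let S2 := (S1.headD 0 + 1) :: S1             -- S.append(S[-1] + 1)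
  let S3 := altLoop dp arr m nn S2
  S3.headD 0 - S3.tail.headD 0                 -- S[-1] - S[-2]

-- ===== PRECONDITION & SPEC =====
-- Pre_ = the inputs on which A returns without an exception AND without Python's negative-index
-- wraparound: A raises unless -len(dp) ≤ n < len(dp) (dp[n]=1) and n ≤ len(arr) (the arr[i]
-- reads); for -len(dp) ≤ n < 0 A returns a value only through the accidental wraparound of
-- dp[n]=1, which Pre_ also excludes (see the cite in claim.json).
def Pre_varpaths (n : Int) (dp : List Int) (arr : List Int) : Prop :=
  0 ≤ n ∧ n < (dp.length : Int) ∧ n ≤ (arr.length : Int)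
instance (n : Int) (dp : List Int) (arr : List Int) : Decidable (Pre_varpaths n dp arr) := by unfold Pre_varpaths; infer_instance

def pvWitness_varpaths : Int × List Int × List Int := (2, [0, 0, 0], [1, 2])

def Spec_varpaths (n : Int) (dp : List Int) (arr : List Int) (out : Int) : Prop := out = varpaths_alt n dp arr
instance (n : Int) (dp : List Int) (arr : List Int) (out : Int) : Decidable (Spec_varpaths n dp arr out) := by unfold Spec_varpaths; infer_instance

-- ===== CLAIM (what is proved, stated in full; the proofs are below) =====
def Claim_equal_varpaths : Prop := ∀ (n : Int) (dp : List Int) (arr : List Int), Dom_varpaths n dp arr → Pre_varpaths n dp arr → Spec_varpaths n dp arr (varpaths n dp arr)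

-- ===== LEMMAS AND PROOFS =====

-- the final value of cell k (dp1 = dp with dp[n] = 1): cells ≥ n keep dp1's value, cells < n
-- add the sum of the next min(arr[k], m-1-k) final cells — both programs compute fF … 0
def fF (dp1 arr : List Int) (n m : Nat) (k : Nat) : Int :=
  if _h : k < n then
    dp1.getD k 0 +
      ((List.range ((min (arr.getD k 0) ((m : Int) - 1 - k)).toNat)).map
        (fun t => fF dp1 arr n m (k+1+t))).sum
  else dp1.getD k 0
termination_by n - k
decreasing_by omega

-- suffix sum of final values over [k, m)
def Ssum (dp1 arr : List Int) (n m k : Nat) : Int :=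
  ((List.range (m - k)).map (fun t => fF dp1 arr n m (k+t))).sum

-- A's dp list once the outer loop has processed indices i … n-1
def mixL (dp1 arr : List Int) (n m i : Nat) : List Int :=
  dp1.take i ++ (List.range (m - i)).map (fun t => fF dp1 arr n m (i+t))

-- Source B's S (reversed) once it holds S_i … S_m
def Slist (dp1 arr : List Int) (n m i : Nat) : List Int :=
  (List.range (m + 1 - i)).map (fun t => Ssum dp1 arr n m (i+t))

theorem fF_of_le {dp1 arr : List Int} {n m k : Nat} (h : n ≤ k) :
    fF dp1 arr n m k = dp1.getD k 0 := by
  rw [fF]; simp [Nat.not_lt.mpr h]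

theorem length_mixL {dp1 arr : List Int} {n m i : Nat} (hm : dp1.length = m) (hi : i ≤ m) :
    (mixL dp1 arr n m i).length = m := by
  simp [mixL, hm]; omega

theorem getD_mixL {dp1 arr : List Int} {n m i k : Nat} (hm : dp1.length = m) (hi : i ≤ m)
    (hk : k < m) :
    (mixL dp1 arr n m i).getD k 0 = if k < i then dp1.getD k 0 else fF dp1 arr n m k := by
  unfold mixL
  rcases Nat.lt_or_ge k i with h | h
  · have hk' : k < dp1.length := by omega
    simp [List.getD, List.getElem?_append, h, hk']
  · have h1 : k - i < m - i := by omega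
    have h2 : i + (k - i) = k := by omega
    simp [List.getD, List.getElem?_append, hm, Nat.min_eq_left hi, Nat.not_lt.mpr h, h1, h2]

theorem mixL_n {dp1 arr : List Int} {n m : Nat} (hm : dp1.length = m) (hn : n ≤ m) :
    mixL dp1 arr n m n = dp1 := by
  have hlen : (mixL dp1 arr n m n).length = dp1.length := by rw [length_mixL hm hn, hm]
  apply List.ext_getElem hlen
  intro k hk1 hk2
  have hk : k < m := by omega
  rw [← List.getD_eq_getElem _ 0 hk1, ← List.getD_eq_getElem _ 0 hk2, getD_mixL hm hn hk]
  split
  · rfl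
  · rw [fF_of_le (by omega)]

theorem set_mixL {dp1 arr : List Int} {n m i : Nat} (hm : dp1.length = m) (hi : i < m) :
    (mixL dp1 arr n m (i+1)).set i (fF dp1 arr n m i) = mixL dp1 arr n m i := by
  have h1 : (mixL dp1 arr n m (i+1)).length = m := length_mixL hm (by omega)
  have h2 : (mixL dp1 arr n m i).length = m := length_mixL hm (by omega)
  have hlen : ((mixL dp1 arr n m (i+1)).set i (fF dp1 arr n m i)).length = (mixL dp1 arr n m i).length := by
    simp [h1, h2]
  apply List.ext_getElem hlen
  intro k hk1 hk2
  have hk : k < m := by omega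
  rw [List.getElem_set]
  rw [← List.getD_eq_getElem _ 0 hk2, getD_mixL hm (by omega) hk]
  split
  · subst_vars; simp
  · rw [← List.getD_eq_getElem _ 0 (by omega : k < (mixL dp1 arr n m (i+1)).length),
      getD_mixL hm (by omega) hk]
    rcases Nat.lt_or_ge k i with h | h
    · simp [h, Nat.lt_succ_of_lt h]
    · have : ¬ k < i + 1 := by omega
      simp [this, Nat.not_lt.mpr h]

theorem set_self_getD (L : List Int) (i : Nat) (h : i < L.length) :
    L.set i (L.getD i 0) = L := by
  rw [List.getD_eq_getElem _ 0 h, List.set_getElem_self]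

-- A's inner while loop, run from counter j with enough fuel, adds the range sum of the next
-- min(arrI, len-1-i) cells to cell i
theorem whileA_run (arrI : Int) (i : Nat) :
    ∀ (fuel j : Nat) (L : List Int), 1 ≤ j → i < L.length →
      (min arrI ((L.length : Int) - 1 - i)).toNat + 1 ≤ j + fuel →
      varpathsWhile arrI i j fuel L =
        L.set i (L.getD i 0 +
          ((List.range ((min arrI ((L.length : Int) - 1 - i)).toNat + 1 - j)).map
            (fun t => L.getD (i+j+t) 0)).sum) := by
  intro fuel
  induction fuel with
  | zero =>
    intro j L hj hi hf
    have : (min arrI ((L.length : Int) - 1 - i)).toNat + 1 - j = 0 := by omega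
    rw [varpathsWhile, this]
    simp only [List.range_zero, List.map_nil, List.sum_nil, add_zero]
    exact (set_self_getD L i hi).symm
  | succ fuel ih =>
    intro j L hj hi hf
    set J := (min arrI ((L.length : Int) - 1 - i)).toNat with hJ
    rw [varpathsWhile]
    split
    · rename_i hcond
      have hjJ : j ≤ J := by
        rcases hcond with ⟨h1, h2⟩
        omega
      set L' := L.set i (L.getD i 0 + L.getD (i+j) 0) with hL'
      have hlen : L'.length = L.length := by simp [hL']
      have hiL' : i < L'.length := by omega
      have := ih (j+1) L' hj.step hiL' (by rw [hlen, ← hJ]; omega)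
      rw [hlen, ← hJ] at this
      -- rewrite L' reads in terms of L
      have hgetI : L'.getD i 0 = L.getD i 0 + L.getD (i+j) 0 := by
        rw [hL', List.getD_eq_getElem _ 0 (by omega), List.getElem_set_self (by simpa using hi)]
      have hgetO : ∀ t, L'.getD (i+(j+1)+t) 0 = L.getD (i+(j+1)+t) 0 := by
        intro t
        rw [hL']
        rw [List.getD, List.getD, List.getElem?_set_ne (by omega)]
        rfl
      have h2 : J + 1 - (j+1) = J - j := by omega
      rw [h2] at this
      rw [this, List.set_set]
      congr 1
      rw [hgetI]
      have hsplit : J + 1 - j = (J - j) + 1 := by omega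
      rw [hsplit, List.range_succ_eq_map, List.map_cons, List.map_map, List.sum_cons]
      simp only [Nat.add_zero]
      rw [add_assoc]
      have hmap : List.map (fun t => L'.getD (i + (j + 1) + t) 0) (List.range (J - j)) =
          List.map ((fun t => L.getD (i + j + t) 0) ∘ Nat.succ) (List.range (J - j)) := by
        apply List.map_congr_left
        intro t _
        rw [hgetO t]
        simp only [Function.comp, Nat.succ_eq_add_one]
        have he : i + (j + 1) + t = i + j + (t + 1) := by omega
        rw [he]
      rw [hmap]
    · rename_i hcond
      have : J + 1 - j = 0 := by
        rcases Decidable.not_and_iff_not_or_not.mp hcond with h | h <;> omega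
      rw [this]
      simp only [List.range_zero, List.map_nil, List.sum_nil, add_zero]
      exact (set_self_getD L i hi).symm

-- A's outer loop turns the mixed list at i into the fully final list
theorem outer_run {dp1 arr : List Int} {n m : Nat} (hm : dp1.length = m) (hn : n < m) :
    ∀ i, i ≤ n → varpathsOuter arr i (mixL dp1 arr n m i) = mixL dp1 arr n m 0 := by
  intro i
  induction i with
  | zero => intro _; rfl
  | succ i ih =>
    intro h
    have hi1 : i + 1 ≤ m := by omega
    have hL : (mixL dp1 arr n m (i+1)).length = m := length_mixL hm hi1
    have hiL : i < (mixL dp1 arr n m (i+1)).length := by omega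
    rw [varpathsOuter]
    rw [whileA_run (arr.getD i 0) i ((mixL dp1 arr n m (i+1)).length + 1) 1 _ (le_refl 1) hiL
      (by rw [hL]; omega)]
    set L := mixL dp1 arr n m (i+1) with hLdef
    have hKeq : (min (arr.getD i 0) ((L.length : Int) - 1 - ↑i)).toNat + 1 - 1
        = (min (arr.getD i 0) ((m : Int) - 1 - ↑i)).toNat := by rw [hL]; omega
    rw [hKeq]
    set K := (min (arr.getD i 0) ((m : Int) - 1 - ↑i)).toNat with hKdef
    have hgetI : L.getD i 0 = dp1.getD i 0 := by
      rw [hLdef, getD_mixL hm hi1 (by omega)]; simp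
    have hmap : (List.range K).map (fun t => L.getD (i+1+t) 0)
        = (List.range K).map (fun t => fF dp1 arr n m (i+1+t)) := by
      apply List.map_congr_left
      intro t ht
      rw [List.mem_range] at ht
      rw [hLdef, getD_mixL hm hi1 (by omega)]
      simp [Nat.not_lt.mpr (by omega : i + 1 ≤ i + 1 + t)]
    rw [hgetI, hmap]
    have hfF : dp1.getD i 0 + ((List.range K).map (fun t => fF dp1 arr n m (i+1+t))).sum
        = fF dp1 arr n m i := by
      rw [fF]
      simp [Nat.lt_of_lt_of_le (Nat.lt_succ_self i) h, hKdef]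
    rw [hfF, hLdef, set_mixL hm (by omega)]
    exact ih (by omega)

theorem Ssum_step {dp1 arr : List Int} {n m k : Nat} (hk : k < m) :
    Ssum dp1 arr n m k = fF dp1 arr n m k + Ssum dp1 arr n m (k+1) := by
  unfold Ssum
  have h : m - k = (m - (k+1)) + 1 := by omega
  rw [h, List.range_succ_eq_map, List.map_cons, List.map_map, List.sum_cons, Nat.add_zero]
  congr 1
  refine congrArg (List.sum (α := Int)) (List.map_congr_left ?_)
  intro t _
  simp only [Function.comp, Nat.succ_eq_add_one]
  have he : k + (t + 1) = k + 1 + t := by omega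
  rw [he]

theorem Ssum_telescope {dp1 arr : List Int} {n m : Nat} :
    ∀ (c k : Nat), k + c ≤ m →
      Ssum dp1 arr n m k - Ssum dp1 arr n m (k+c) =
        ((List.range c).map (fun t => fF dp1 arr n m (k+t))).sum := by
  intro c
  induction c with
  | zero => intro k _; simp
  | succ c ih =>
    intro k hc
    have h1 : k + c < m := by omega
    have h2 : k + (c+1) = (k + c) + 1 := by omega
    rw [h2, List.range_succ, List.map_append, List.sum_append]
    rw [← ih k (by omega)]
    rw [Ssum_step h1]
    simp
    ring

theorem Slist_cons {dp1 arr : List Int} {n m k : Nat} (hk : k ≤ m) :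
    Slist dp1 arr n m k = Ssum dp1 arr n m k :: Slist dp1 arr n m (k+1) := by
  unfold Slist
  have h : m + 1 - k = (m + 1 - (k+1)) + 1 := by omega
  rw [h, List.range_succ_eq_map, List.map_cons, List.map_map, Nat.add_zero]
  congr 1
  refine List.map_congr_left ?_
  intro t _
  simp only [Function.comp, Nat.succ_eq_add_one]
  have he : k + (t + 1) = k + 1 + t := by omega
  rw [he]

theorem headD_Slist {dp1 arr : List Int} {n m k : Nat} (hk : k ≤ m) :
    (Slist dp1 arr n m k).headD 0 = Ssum dp1 arr n m k := by
  rw [Slist_cons hk]; rfl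

theorem getD_Slist {dp1 arr : List Int} {n m k t : Nat} (hk : k ≤ m) (ht : t ≤ m - k) :
    (Slist dp1 arr n m k).getD t 0 = Ssum dp1 arr n m (k+t) := by
  unfold Slist
  have h : t < m + 1 - k := by omega
  rw [List.getD_eq_getElem _ 0 (by simpa using h)]
  simp

-- Source B's first loop builds the suffix sums S_m … S_{n+1}
theorem altBuild_run {dp dp1 arr : List Int} {n m : Nat}
    (hdp1 : dp1 = dp.set n 1) :
    ∀ t, n + 1 + t ≤ m →
      altBuild dp n t (Slist dp1 arr n m (n+1+t)) = Slist dp1 arr n m (n+1) := by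
  intro t
  induction t with
  | zero => intro _; rfl
  | succ t ih =>
    intro ht
    rw [altBuild]
    have h1 : n + 1 + t < m := by omega
    have hd : dp.getD (n+t+1) 0 = dp1.getD (n+t+1) 0 := by
      rw [hdp1, List.getD, List.getD, List.getElem?_set_ne (by omega)]
    have hs : (Slist dp1 arr n m (n+1+(t+1))).headD 0 + dp.getD (n+t+1) 0
        = Ssum dp1 arr n m (n+1+t) := by
      rw [headD_Slist (by omega), hd, Ssum_step h1, fF_of_le (by omega)]
      have he : n + 1 + t + 1 = n + 1 + (t + 1) := by omega
      have he2 : n + t + 1 = n + 1 + t := by omega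
      rw [he, he2]
      ring
    rw [hs]
    have hc : Ssum dp1 arr n m (n+1+t) :: Slist dp1 arr n m (n+1+(t+1))
        = Slist dp1 arr n m (n+1+t) := by
      have he : n + 1 + t + 1 = n + 1 + (t + 1) := by omega
      rw [← he, ← Slist_cons (by omega)]
    rw [hc]
    exact ih (by omega)

-- Source B's second loop extends the suffix sums S_i … S_m down to S_0; each cell is one
-- difference of two suffix sums (the heart of B)
theorem altLoop_run {dp dp1 arr : List Int} {n m : Nat}
    (hdp1 : dp1 = dp.set n 1) (hn : n < m) :
    ∀ i, i ≤ n → altLoop dp arr m i (Slist dp1 arr n m i) = Slist dp1 arr n m 0 := by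
  intro i
  induction i with
  | zero => intro _; rfl
  | succ i ih =>
    intro h
    rw [altLoop]
    have hi1 : i + 1 ≤ m := by omega
    set hi' : Int := max (i : Int) (min ((i : Int) + arr.getD i 0) ((m : Int) - 1)) with hhi
    have hH : (hi' - (i : Int)).toNat = (min (arr.getD i 0) ((m : Int) - 1 - (i:Nat))).toNat := by
      omega
    set K := (min (arr.getD i 0) ((m : Int) - 1 - (i:Nat))).toNat with hK
    have hKm : K ≤ m - 1 - i := by omega
    have hgd : (Slist dp1 arr n m (i+1)).getD (hi' - (i:Int)).toNat 0
        = Ssum dp1 arr n m (i+1+K) := by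
      rw [hH]; exact getD_Slist (by omega) (by omega)
    have hhead : (Slist dp1 arr n m (i+1)).headD 0 = Ssum dp1 arr n m (i+1) := headD_Slist hi1
    rw [hgd, hhead]
    have hdpi : dp.getD i 0 = dp1.getD i 0 := by
      rw [hdp1, List.getD, List.getD, List.getElem?_set_ne (by omega)]
    have hcell : dp.getD i 0 + Ssum dp1 arr n m (i+1) - Ssum dp1 arr n m (i+1+K)
        = fF dp1 arr n m i := by
      rw [hdpi]
      have := Ssum_telescope (dp1 := dp1) (arr := arr) (n := n) (m := m) K (i+1) (by omega)
      rw [add_sub_assoc, this, fF, dif_pos (by omega : i < n)]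
    rw [hcell]
    have hc : Ssum dp1 arr n m (i+1) + fF dp1 arr n m i = Ssum dp1 arr n m i := by
      have hstep := Ssum_step (dp1 := dp1) (arr := arr) (n := n) (m := m) (k := i) (by omega)
      omega
    rw [hc, ← Slist_cons (by omega)]
    exact ih (by omega)

-- ===== VERDICT (by name: the statement is the Claim_ definition above) =====
theorem varpaths_spec : Claim_equal_varpaths := by
  intro n dp arr _hdom hpre
  obtain ⟨hn0, hnlt, _hna⟩ := hpre
  set m := dp.length with hm
  set nn := n.toNat with hnn
  have hcast : n = (nn : Int) := (Int.toNat_of_nonneg hn0).symm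
  have hnm : nn < m := by omega
  set dp1 := dp.set nn 1 with hdp1
  have hlen1 : dp1.length = m := by rw [hdp1, List.length_set, hm]
  -- A computes fF … 0
  have hA : varpaths n dp arr = fF dp1 arr nn m 0 := by
    unfold varpaths
    rw [hcast, PySem.List.pySet?_natCast (xs := dp) (n := nn) (v := 1) (by omega)]
    have hstart : dp.set nn 1 = mixL dp1 arr nn m nn := (mixL_n hlen1 (by omega)).symm
    rw [hstart]
    show PySem.List.pyGetD (varpathsOuter arr ((nn : Int)).toNat (mixL dp1 arr nn m nn)) 0 0
        = fF dp1 arr nn m 0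
    rw [Int.toNat_natCast, outer_run hlen1 hnm nn (le_refl nn)]
    rw [PySem.List.pyGetD_zero, getD_mixL hlen1 (by omega) (by omega)]
    simp
  -- B computes fF … 0
  have hinit : ([0] : List Int) = Slist dp1 arr nn m (nn+1+(m-1-nn)) := by
    have he : nn + 1 + (m - 1 - nn) = m := by omega
    rw [he]
    simp [Slist, Ssum]
  have hSb : altBuild dp nn (m-1-nn) [0] = Slist dp1 arr nn m (nn+1) := by
    rw [hinit]
    exact altBuild_run hdp1 (m-1-nn) (by omega)
  have hB : varpaths_alt n dp arr = fF dp1 arr nn m 0 := by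
    have hrfl : varpaths_alt n dp arr =
        (altLoop dp arr m nn
            (((altBuild dp nn (m-1-nn) [0]).headD 0 + 1) :: altBuild dp nn (m-1-nn) [0])).headD 0 -
        (altLoop dp arr m nn
            (((altBuild dp nn (m-1-nn) [0]).headD 0 + 1) :: altBuild dp nn (m-1-nn) [0])).tail.headD 0 := rfl
    rw [hrfl, hSb]
    have hS2 : ((Slist dp1 arr nn m (nn+1)).headD 0 + 1) :: Slist dp1 arr nn m (nn+1)
        = Slist dp1 arr nn m nn := by
      rw [headD_Slist (by omega), Slist_cons (show nn ≤ m by omega)]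
      congr 1
      rw [Ssum_step hnm, fF_of_le (le_refl nn), hdp1,
        List.getD_eq_getElem _ 0 (by simpa using hnm), List.getElem_set_self (by simpa using hnm)]
      ring
    rw [hS2, altLoop_run hdp1 hnm nn (le_refl nn)]
    rw [Slist_cons (show (0:Nat) ≤ m by omega)]
    simp only [List.headD_cons, List.tail_cons]
    rw [headD_Slist (by omega : (0:Nat)+1 ≤ m)]
    have hstep := Ssum_step (dp1 := dp1) (arr := arr) (n := nn) (m := m) (k := 0) (by omega)
    omega
  unfold Spec_varpaths
  rw [hA, hB]
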